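-- pv_equiv track=rewrite | github.com/shrijacked/TreeRAG | src/treerag/parser.py | _expand_to_heading
-- ===== SOURCE A (Python) =====
-- def _expand_to_heading(text: str, content_start: int, title: str) -> int:
--     line_start = text.rfind("\n", 0, content_start) + 1
--     candidate_start = line_start
--
--     for _ in range(3):
--         previous_break = text.rfind("\n", 0, max(candidate_start - 1, 0))
--         previous_start = 0 if previous_break == -1 else previous_break + 1
--         previous_line = text[previous_start:candidate_start].rstrip("\n")
--         stripped = previous_line.strip()
--         if not stripped:
--             candidate_start = previous_start
--             continue
--         if stripped.lstrip("#").strip() == title.strip():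
--             return previous_start
--         break
--
--     return content_start
-- ===== SOURCE B (Python) =====
-- def _expand_to_heading(text: str, content_start: int, title: str) -> int:
--     line_start = text.rfind("\n", 0, content_start) + 1
--     target = title.strip()
--
--     # One forward pass over the prefix builds every complete previous line
--     # together with its start offset (the prefix ends with '\n' or is empty,
--     # so the pending buffer at the end is always empty and is discarded).
--     prev = []
--     start = 0
--     buf = []
--     for i, ch in enumerate(text[:line_start]):
--         if ch == "\n":
--             prev.append((start, "".join(buf)))
--             start = i + 1
--             buf = []
--         else:
--             buf.append(ch)
--
--     prev.reverse()
--     for line_off, line in prev[:3]: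
--         stripped = line.strip()
--         if not stripped:
--             continue
--         if stripped.lstrip("#").strip() == target:
--             return line_off
--         break
--     return content_start
-- ===== Notes on version B (the rewrite author's own statement) =====
-- stated objective: alternative
-- what changed: B replaces A's repeated backward rfind() walk with a staged pipeline: one forward pass over the prefix builds a list of (start offset, line) pairs for every complete line, then it scans just the first three entries of that reversed list (blank lines consume a slot) for the stripped heading.
import Mathlib
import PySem

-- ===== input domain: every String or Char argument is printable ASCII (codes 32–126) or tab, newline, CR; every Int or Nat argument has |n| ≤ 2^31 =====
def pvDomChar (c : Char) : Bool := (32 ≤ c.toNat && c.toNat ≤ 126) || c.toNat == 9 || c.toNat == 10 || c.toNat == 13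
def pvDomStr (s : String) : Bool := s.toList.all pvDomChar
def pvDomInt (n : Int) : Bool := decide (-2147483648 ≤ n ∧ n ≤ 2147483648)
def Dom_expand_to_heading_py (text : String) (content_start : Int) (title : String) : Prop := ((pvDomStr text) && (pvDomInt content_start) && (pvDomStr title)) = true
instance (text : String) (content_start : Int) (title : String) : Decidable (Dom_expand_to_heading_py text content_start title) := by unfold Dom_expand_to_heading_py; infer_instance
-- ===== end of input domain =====

-- B builds an indexed list of all previous lines in one forward pass and scans its first
-- three entries, instead of A's repeated backward rfind; objective: alternative, same cost.

-- hand port of s.rstrip("\n"), exact: drops trailing '\n' characters (used by A)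
def pvRstripNl (cs : List Char) : List Char := (cs.reverse.dropWhile (fun c => c == '\n')).reverse
-- hand port of s.lstrip("#"), exact: drops leading '#' characters (shared string helper)
def pvLstripHash (cs : List Char) : List Char := cs.dropWhile (fun c => c == '#')

-- ===== PORT A =====
-- the `for _ in range(3)` loop of A, state = candidate_start; returning content_start = break/exhaustion
def pvALoop (t title : List Char) (content_start : Int) : Nat → Int → Int
  | 0, _ => content_start
  | k+1, candidate_start =>
    let previous_break := PySem.Chars.rfindFrom t ['\n'] 0 (some (max (candidate_start - 1) 0))
    let previous_start := if previous_break = -1 then 0 else previous_break + 1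
    let previous_line := pvRstripNl (PySem.Chars.slice t (some previous_start) (some candidate_start))
    let stripped := PySem.Chars.strip previous_line
    if stripped = [] then pvALoop t title content_start k previous_start
    else if PySem.Chars.strip (pvLstripHash stripped) = PySem.Chars.strip title then previous_start
    else content_start

def expand_to_heading_py (text : String) (content_start : Int) (title : String) : Int :=
  let line_start := PySem.Str.rfindFrom text "\n" 0 (some content_start) + 1
  pvALoop text.toList title.toList content_start 3 line_start

-- ===== PORT B =====
-- Source B's forward enumerate pass: i = current index, start = start of current line, buf = pending
-- chars of the current line; each '\n' emits (start, buf); the leftover buf is discarded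
def pvCollect : List Char → Int → Int → List Char → List (Int × List Char)
  | [], _, _, _ => []
  | ch :: rest, i, start, buf =>
    if ch = '\n' then (start, buf) :: pvCollect rest (i + 1) (i + 1) []
    else pvCollect rest (i + 1) start (buf ++ [ch])

-- Source B's `for (line_off, line) in prev[:3]` loop with continue/break
def pvBScan (target : List Char) (content_start : Int) : List (Int × List Char) → Int
  | [] => content_start
  | (line_off, line) :: rest =>
    let stripped := PySem.Chars.strip line
    if stripped = [] then pvBScan target content_start rest
    else if PySem.Chars.strip (pvLstripHash stripped) = target then line_off
    else content_start

def expand_to_heading_py_alt (text : String) (content_start : Int) (title : String) : Int :=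
  let line_start := PySem.Str.rfindFrom text "\n" 0 (some content_start) + 1
  let target := PySem.Chars.strip title.toList
  let prev := (pvCollect (PySem.Str.slice text none (some line_start)).toList 0 0 []).reverse
  pvBScan target content_start (prev.take 3)

-- ===== PRECONDITION & SPEC =====
def Spec_expand_to_heading_py (text : String) (content_start : Int) (title : String) (out : Int) : Prop := out = expand_to_heading_py_alt text content_start title
instance (text : String) (content_start : Int) (title : String) (out : Int) : Decidable (Spec_expand_to_heading_py text content_start title out) := by unfold Spec_expand_to_heading_py; infer_instance

-- ===== CLAIM (what is proved, stated in full; the proofs are below) =====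
def Claim_equal_expand_to_heading_py : Prop := ∀ (text : String) (content_start : Int) (title : String), Dom_expand_to_heading_py text content_start title → Spec_expand_to_heading_py text content_start title (expand_to_heading_py text content_start title)

-- ===== LEMMAS AND PROOFS =====

-- `[a]` is a prefix of `l` iff `l` starts with `a`
lemma pv_single_prefix_iff (a : Char) (l : List Char) : [a] <+: l ↔ l.head? = some a := by
  cases l with
  | nil => simp
  | cons b bs =>
    rw [List.cons_prefix_cons]
    simp [eq_comm]

lemma pv_single_isPrefixOf_iff (a : Char) (l : List Char) : [a].isPrefixOf l = true ↔ l[0]? = some a := by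
  rw [List.isPrefixOf_iff_prefix, pv_single_prefix_iff, List.head?_eq_getElem?]

lemma pv_none_of_ge (s : List Char) (ch : Char) (i : Nat) (h : s.length ≤ i) : s[i]? ≠ some ch := by
  rw [List.getElem?_eq_none h]
  simp

-- spec of PySem.Chars.rfind.go on a single-character needle
lemma pv_rfind_go_spec (s : List Char) (ch : Char) (j : Nat) :
    (PySem.Chars.rfind.go s [ch] j = -1 ∧ ∀ i : Nat, i ≤ j → s[i]? ≠ some ch) ∨
    (∃ i : Nat, i ≤ j ∧ s[i]? = some ch ∧ PySem.Chars.rfind.go s [ch] j = (i : Int) ∧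
      ∀ i' : Nat, i < i' → i' ≤ j → s[i']? ≠ some ch) := by
  induction j with
  | zero =>
    rw [PySem.Chars.rfind.go]
    by_cases h : s[0]? = some ch
    · right
      exact ⟨0, le_refl 0, h, by rw [if_pos ((pv_single_isPrefixOf_iff ch s).2 h)]; rfl, by omega⟩
    · left
      refine ⟨by rw [if_neg (fun hp => h ((pv_single_isPrefixOf_iff ch s).1 hp))], fun i hi => ?_⟩
      have hi0 : i = 0 := Nat.le_zero.mp hi
      subst hi0; exact h
  | succ j ih =>
    rw [PySem.Chars.rfind.go]
    by_cases h : s[j+1]? = some ch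
    · right
      have hp : [ch].isPrefixOf (s.drop (j+1)) = true := by
        rw [pv_single_isPrefixOf_iff, List.getElem?_drop]
        simpa using h
      exact ⟨j+1, le_refl _, h, by rw [if_pos hp], fun i' h1 h2 => by omega⟩
    · have hcond : ¬ ([ch].isPrefixOf (s.drop (j+1)) = true) := by
        rw [pv_single_isPrefixOf_iff, List.getElem?_drop]
        simpa using h
      rw [if_neg hcond]
      rcases ih with ⟨h1, h2⟩ | ⟨i, hij, hi, hg, hmax⟩
      · left
        refine ⟨h1, fun i hi => ?_⟩
        rcases Nat.lt_or_ge i (j+1) with hlt | hge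
        · exact h2 i (by omega)
        · have hieq : i = j + 1 := by omega
          subst hieq; exact h
      · right
        refine ⟨i, by omega, hi, hg, fun i' h1' h2' => ?_⟩
        rcases Nat.lt_or_ge i' (j+1) with hlt | hge
        · exact hmax i' h1' (by omega)
        · have hieq : i' = j + 1 := by omega
          subst hieq; exact h

-- spec of PySem.Chars.rfind on a single-character needle: the HIGHEST index holding the char, or -1
lemma pv_rfind_spec (s : List Char) (ch : Char) :
    (PySem.Chars.rfind s [ch] = -1 ∧ ∀ i : Nat, s[i]? ≠ some ch) ∨
    (∃ i : Nat, i < s.length ∧ s[i]? = some ch ∧ PySem.Chars.rfind s [ch] = (i : Int) ∧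
      ∀ i' : Nat, i < i' → s[i']? ≠ some ch) := by
  rcases pv_rfind_go_spec s ch s.length with ⟨h1, h2⟩ | ⟨i, hij, hi, hg, hmax⟩
  · left
    refine ⟨h1, fun i => ?_⟩
    rcases Nat.lt_or_ge i (s.length + 1) with hlt | hge
    · exact h2 i (by omega)
    · exact pv_none_of_ge s ch i (by omega)
  · right
    have hlt : i < s.length := by
      by_contra hn
      exact pv_none_of_ge s ch i (by omega) hi
    refine ⟨i, hlt, hi, hg, fun i' hgt => ?_⟩
    rcases Nat.lt_or_ge i' (s.length + 1) with hlt' | hge'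
    · exact hmax i' hgt (by omega)
    · exact pv_none_of_ge s ch i' (by omega)

lemma pv_ite_rfind (s : List Char) :
    (if PySem.Chars.rfind s ['\n'] = -1 then (-1 : Int) else 0 + PySem.Chars.rfind s ['\n']) =
      PySem.Chars.rfind s ['\n'] := by
  rcases pv_rfind_spec s '\n' with ⟨h, -⟩ | ⟨i, -, -, h, -⟩ <;> rw [h] <;> simp

-- rfindFrom with start 0 and an in-range end bound is rfind on the prefix
lemma pv_rfindFrom_det (t : List Char) (b : Int) (h0 : 0 ≤ b) (hn : b ≤ (t.length : Int)) :
    PySem.Chars.rfindFrom t ['\n'] 0 (some b) = PySem.Chars.rfind (t.take b.toNat) ['\n'] := by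
  simp only [PySem.Chars.rfindFrom]
  rw [if_neg (by omega : ¬ (t.length : Int) < b), if_neg (by omega : ¬ b < 0),
      if_neg (lt_irrefl (0 : Int)), if_neg (by omega : ¬ b < 0)]
  rw [Int.toNat_zero, List.drop_zero]
  exact pv_ite_rfind _

-- rfindFrom with start 0 and ANY integer end bound is rfind on some clamped prefix
lemma pv_rfindFrom_zero_any (t : List Char) (b : Int) :
    ∃ e : Nat, e ≤ t.length ∧
      PySem.Chars.rfindFrom t ['\n'] 0 (some b) = PySem.Chars.rfind (t.take e) ['\n'] := by
  by_cases hb : b ≤ 0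
  · rcases eq_or_lt_of_le hb with rfl | hb'
    · refine ⟨0, Nat.zero_le _, ?_⟩
      rw [pv_rfindFrom_det t 0 (le_refl 0) (by exact_mod_cast Nat.zero_le _)]
      norm_num
    · by_cases hbn : b + t.length < 0
      · refine ⟨0, Nat.zero_le _, ?_⟩
        simp only [PySem.Chars.rfindFrom]
        rw [if_neg (by omega : ¬ (t.length : Int) < b), if_pos hb',
            if_neg (lt_irrefl (0 : Int)), if_pos hbn, if_neg (lt_irrefl (0 : Int))]
        simp only [Int.toNat_zero, List.drop_zero, List.take_zero]
        exact pv_ite_rfind _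
      · refine ⟨(b + (t.length : Int)).toNat, by omega, ?_⟩
        simp only [PySem.Chars.rfindFrom]
        rw [if_neg (by omega : ¬ (t.length : Int) < b), if_pos hb',
            if_neg (lt_irrefl (0 : Int)), if_neg hbn,
            if_neg (by omega : ¬ b + (t.length : Int) < 0)]
        simp only [Int.toNat_zero, List.drop_zero]
        exact pv_ite_rfind _
  · have hb0 : 0 < b := by omega
    by_cases hbl : b ≤ (t.length : Int)
    · exact ⟨b.toNat, by omega, pv_rfindFrom_det t b (by omega) hbl⟩
    · refine ⟨t.length, le_refl _, ?_⟩
      simp only [PySem.Chars.rfindFrom]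
      rw [if_pos (by omega : (t.length : Int) < b), if_neg (lt_irrefl (0 : Int)),
          if_neg (by omega : ¬ ((t.length : Nat) : Int) < 0)]
      simp only [Int.toNat_zero, List.drop_zero, Int.toNat_natCast, List.take_length]
      exact pv_ite_rfind _

-- pvRstripNl on a newline-free line followed by one newline gives the line back
lemma pv_rstripNl_no (ys : List Char) (h : ∀ a ∈ ys, a ≠ '\n') : pvRstripNl (ys ++ ['\n']) = ys := by
  unfold pvRstripNl
  rw [List.reverse_append]
  have h1 : (['\n'] : List Char).reverse ++ ys.reverse = '\n' :: ys.reverse := by simp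
  rw [h1, List.dropWhile_cons, if_pos (by simp)]
  have h2 : ys.reverse.dropWhile (fun c => c == '\n') = ys.reverse := by
    cases hys : ys.reverse with
    | nil => simp
    | cons a as =>
      have ha : a ∈ ys := by
        rw [← List.mem_reverse, hys]; exact List.mem_cons_self ..
      rw [List.dropWhile_cons, if_neg (by simp [h a ha])]
  rw [h2, List.reverse_reverse]

-- A's loop with candidate 0 spins to exhaustion and returns content_start
lemma pv_aloop_zero (t title : List Char) (cs : Int) (k : Nat) : pvALoop t title cs k 0 = cs := by
  induction k with
  | zero => rfl
  | succ k ih =>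
    simp only [pvALoop]
    rw [show max ((0:Int) - 1) 0 = (0:Int) by omega,
        pv_rfindFrom_det t 0 (le_refl 0) (by exact_mod_cast Nat.zero_le _)]
    rw [show ((0:Int).toNat) = 0 from rfl, List.take_zero]
    rw [show PySem.Chars.rfind ([] : List Char) ['\n'] = -1 from by decide, if_pos rfl]
    have hsl : PySem.Chars.slice t (some (0:Int)) (some (0:Int)) = [] := by
      rw [PySem.Chars.slice_eq_listSlice]
      have hs := PySem.List.slice_natCast t 0 0
      simpa using hs
    rw [hsl]
    rw [show pvRstripNl [] = [] from rfl, show PySem.Chars.strip ([] : List Char) = [] from by decide,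
        if_pos rfl]
    exact ih

-- pvCollect on a newline-free chunk closed by one '\n' emits exactly one line
lemma pv_collect_one (mid : List Char) (h : ∀ a ∈ mid, a ≠ '\n') :
    ∀ (i s : Int) (b : List Char), pvCollect (mid ++ ['\n']) i s b = [(s, b ++ mid)] := by
  induction mid with
  | nil => intro i s b; simp [pvCollect]
  | cons x xs ih =>
    intro i s b
    have hx : ¬ x = '\n' := h x (List.mem_cons_self ..)
    simp only [List.cons_append, pvCollect, if_neg hx]
    rw [ih (fun a ha => h a (List.mem_cons_of_mem _ ha))]
    simp

-- pvCollect distributes over an append whose left part ends with '\n'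
lemma pv_collect_append (u : List Char) (hu : u.getLast? = some '\n') :
    ∀ (w : List Char) (i s : Int) (b : List Char),
      pvCollect (u ++ w) i s b =
        pvCollect u i s b ++ pvCollect w (i + u.length) (i + u.length) [] := by
  induction u with
  | nil => simp at hu
  | cons x xs ih =>
    intro w i s b
    cases xs with
    | nil =>
      have hx : x = '\n' := by simpa using hu
      subst hx
      simp [pvCollect]
    | cons y ys =>
      have hu' : (y :: ys).getLast? = some '\n' := by
        rwa [List.getLast?_cons_cons] at hu
      have step : ∀ (l : List Char) (i s : Int) (b : List Char),
          pvCollect (x :: l) i s b =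
            if x = '\n' then (s, b) :: pvCollect l (i + 1) (i + 1) []
            else pvCollect l (i + 1) s (b ++ [x]) := fun l i s b => rfl
      rw [List.cons_append, step, step]
      by_cases hx : x = '\n'
      · rw [if_pos hx, if_pos hx, ih hu', List.cons_append]
        simp only [List.length_cons]
        congr 3 <;> push_cast <;> ring
      · rw [if_neg hx, if_neg hx, ih hu']
        simp only [List.length_cons]
        congr 2 <;> push_cast <;> ring

-- the core correspondence: A's loop at candidate c equals B's scan of the first k
-- collected previous lines of t.take c (invariant: c = 0 or t[c-1] = '\n')
lemma pv_loop_eq (t title : List Char) (cs : Int) :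
    ∀ (k : Nat) (c : Nat), c ≤ t.length → (c ≠ 0 → t[c-1]? = some '\n') →
    pvALoop t title cs k (c : Int) =
      pvBScan (PySem.Chars.strip title) cs (((pvCollect (t.take c) 0 0 []).reverse).take k) := by
  intro k
  induction k with
  | zero => intro c _ _; rfl
  | succ k ih =>
    intro c hcL hnl
    cases c with
    | zero =>
      simp only [Nat.cast_zero, List.take_zero]
      rw [pv_aloop_zero]
      rfl
    | succ c' =>
      have hc't : c' < t.length := by omega
      have hnl' : t[c']? = some '\n' := by simpa using hnl (by omega)
      have htake : t.take (c'+1) = t.take c' ++ ['\n'] := by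
        rw [List.take_add_one, hnl']
        rfl
      simp only [pvALoop]
      rw [show max (((c'+1 : Nat) : Int) - 1) 0 = ((c' : Nat) : Int) from by push_cast; omega]
      rw [pv_rfindFrom_det t (c' : Int) (by positivity) (by exact_mod_cast le_of_lt hc't)]
      rw [Int.toNat_natCast]
      have hxlen : (t.take c').length = c' := by
        rw [List.length_take, Nat.min_eq_left (le_of_lt hc't)]
      rcases pv_rfind_spec (t.take c') '\n' with ⟨hr, hnone⟩ | ⟨i, hilt, hival, hr, hmaxL⟩
      · -- no newline before the current line: the single previous line starts at 0
        rw [hr, if_pos rfl]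
        have hmidno : ∀ a ∈ t.take c', a ≠ '\n' := by
          intro a ha heq; subst heq
          obtain ⟨q, hq⟩ := List.mem_iff_getElem?.1 ha
          exact hnone q hq
        have hcol : pvCollect (t.take (c'+1)) 0 0 [] = [((0:Int), t.take c')] := by
          rw [htake, pv_collect_one _ hmidno]
          rfl
        rw [hcol]
        have hslA : PySem.Chars.slice t (some (0:Int)) (some ((c'+1 : Nat) : Int)) =
            t.take c' ++ ['\n'] := by
          rw [PySem.Chars.slice_eq_listSlice,
              show (0:Int) = ((0:Nat) : Int) from rfl, PySem.List.slice_natCast,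
              Nat.sub_zero, List.drop_zero, ← htake]
        rw [hslA, pv_rstripNl_no _ hmidno]
        simp only [List.reverse_cons, List.reverse_nil, List.nil_append, List.take_succ_cons,
          List.take_nil, pvBScan]
        split_ifs with h1 h2
        · have h0 := ih 0 (Nat.zero_le _) (fun h => absurd rfl h)
          simp only [Nat.cast_zero, List.take_zero] at h0
          rw [h0]
          simp [pvCollect, pvBScan]
        · rfl
        · rfl
      · -- the previous newline is at index i of the prefix: previous line starts at i+1
        have hilt' : i < c' := by rwa [hxlen] at hilt
        rw [hr, if_neg (by omega : ¬ ((i : Nat) : Int) = -1)]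
        have hti : t[i]? = some '\n' := by
          rw [List.getElem?_take, if_pos hilt'] at hival
          exact hival
        have hmid_no : ∀ a ∈ (t.take c').drop (i+1), a ≠ '\n' := by
          intro a ha heq; subst heq
          obtain ⟨q, hq⟩ := List.mem_iff_getElem?.1 ha
          rw [List.getElem?_drop] at hq
          exact hmaxL (i+1+q) (by omega) hq
        have hulen : (t.take (i+1)).length = i + 1 := by
          rw [List.length_take, Nat.min_eq_left (by omega)]
        have hulast : (t.take (i+1)).getLast? = some '\n' := by
          rw [List.getLast?_eq_getElem?, hulen, Nat.add_sub_cancel, List.getElem?_take,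
              if_pos (by omega)]
          exact hti
        have hsplit : t.take (c'+1) = t.take (i+1) ++ ((t.take c').drop (i+1) ++ ['\n']) := by
          rw [htake, ← List.append_assoc]
          congr 1
          rw [show t.take (i+1) = (t.take c').take (i+1) from by
                rw [List.take_take, Nat.min_eq_left (by omega)]]
          exact (List.take_append_drop _ _).symm
        have hcol : pvCollect (t.take (c'+1)) 0 0 [] =
            pvCollect (t.take (i+1)) 0 0 [] ++ [(((i+1 : Nat) : Int), (t.take c').drop (i+1))] := by
          rw [hsplit, pv_collect_append _ hulast, hulen,
              pv_collect_one _ hmid_no]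
          simp
        rw [hcol]
        have hslA : PySem.Chars.slice t (some ((i : Nat) + 1 : Int)) (some ((c'+1 : Nat) : Int)) =
            (t.take c').drop (i+1) ++ ['\n'] := by
          rw [PySem.Chars.slice_eq_listSlice,
              show ((i : Nat) + 1 : Int) = ((i + 1 : Nat) : Int) from by push_cast; ring,
              PySem.List.slice_natCast,
              show c' + 1 - (i + 1) = (c' - (i+1)) + 1 from by omega,
              List.take_add_one, List.getElem?_drop,
              show i + 1 + (c' - (i+1)) = c' from by omega, hnl']
          rw [List.drop_take]
          rfl
        rw [hslA, pv_rstripNl_no _ hmid_no]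
        simp only [List.reverse_append, List.reverse_cons, List.reverse_nil, List.nil_append,
          List.cons_append, List.take_succ_cons, pvBScan]
        split_ifs with h1 h2
        · have hrec := ih (i+1) (by omega) (by intro _; simpa using hti)
          rw [show ((i : Nat) : Int) + 1 = ((i + 1 : Nat) : Int) from by push_cast; ring, hrec]
        · push_cast; ring
        · rfl

-- ===== VERDICT (by name: the statement is the Claim_ definition above) =====
theorem expand_to_heading_py_spec : Claim_equal_expand_to_heading_py := by
  intro text content_start title _
  unfold Spec_expand_to_heading_py
  simp only [expand_to_heading_py, expand_to_heading_py_alt, PySem.Str.rfindFrom_eq]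
  rw [show ("\n" : String).toList = ['\n'] from rfl]
  obtain ⟨e, he, hR⟩ := pv_rfindFrom_zero_any text.toList content_start
  rw [hR]
  rcases pv_rfind_spec (text.toList.take e) '\n' with ⟨hr, -⟩ | ⟨i, hilt, hival, hr, -⟩
  · rw [hr, show (-1 : Int) + 1 = ((0 : Nat) : Int) from by norm_num]
    have hrev : (PySem.Str.slice text none (some ((0 : Nat) : Int))).toList =
        text.toList.take 0 := by
      rw [PySem.Str.toList_slice, PySem.Chars.slice_eq_listSlice,
          PySem.List.slice_to _ (by norm_num)]
      rfl
    rw [hrev]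
    exact pv_loop_eq text.toList title.toList content_start 3 0 (Nat.zero_le _)
      (fun h => absurd rfl h)
  · rw [hr, show ((i : Nat) : Int) + 1 = ((i + 1 : Nat) : Int) from by push_cast; ring]
    have hilen : i < text.toList.length := by
      rw [List.length_take] at hilt; omega
    have hrev : (PySem.Str.slice text none (some ((i + 1 : Nat) : Int))).toList =
        text.toList.take (i+1) := by
      rw [PySem.Str.toList_slice, PySem.Chars.slice_eq_listSlice,
          PySem.List.slice_to _ (by positivity), Int.toNat_natCast]
    rw [hrev]
    have hti : text.toList[i]? = some '\n' := by
      rw [List.getElem?_take, if_pos (by rw [List.length_take] at hilt; omega)] at hival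
      exact hival
    exact pv_loop_eq text.toList title.toList content_start 3 (i+1) (by omega)
      (fun _ => by simpa using hti)
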